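-- pv_equiv track=rewrite | github.com/indeni/cloudrail-tfe-integration | docker/derived_image/cloud_rail/utils/string_utils.py | convert_strs_to_bool
-- ===== SOURCE A (Python) =====
-- from typing import Optional, List
--
-- def convert_strs_to_bool(values: List[str]) -> Optional[bool]:
--     if not values:
--         return None
--     found_true = False
--     found_false = False
--     for value in values:
--         if value.lower() == 'true':
--             found_true = True
--         if value.lower() == 'false':
--             found_false = True
--     if found_false and found_true:
--         return None
--     if found_true:
--         return True
--     if found_false:
--         return False
--     return None
-- ===== SOURCE B (Python) =====
-- def convert_strs_to_bool(values):
--     for i, v in enumerate(values):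
--         w = v.lower()
--         if w == 'true':
--             if any(u.lower() == 'false' for u in values[i + 1:]):
--                 return None
--             return True
--         if w == 'false':
--             if any(u.lower() == 'true' for u in values[i + 1:]):
--                 return None
--             return False
--     return None
-- ===== Notes on version B (the rewrite author's own statement) =====
-- stated objective: alternative
-- what changed: Replaces A's full-list flag-accumulating loop with an early-exit search: find the first element equal to 'true'/'false' (lowercased) and then scan only the remaining suffix for the opposite literal, returning immediately.
import Mathlib
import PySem

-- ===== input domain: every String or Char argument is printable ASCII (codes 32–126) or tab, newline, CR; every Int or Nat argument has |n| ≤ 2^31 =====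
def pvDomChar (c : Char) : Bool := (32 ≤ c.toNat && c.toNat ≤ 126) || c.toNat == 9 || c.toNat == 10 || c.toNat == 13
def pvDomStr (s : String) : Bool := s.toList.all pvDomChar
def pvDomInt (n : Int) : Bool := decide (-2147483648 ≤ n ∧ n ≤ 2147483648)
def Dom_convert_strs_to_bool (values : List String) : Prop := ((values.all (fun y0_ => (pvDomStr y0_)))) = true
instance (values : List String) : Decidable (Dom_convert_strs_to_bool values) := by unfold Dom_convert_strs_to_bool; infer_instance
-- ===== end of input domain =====

-- B replaces A's flag-accumulating full pass by an early-exit search: find the first 'true'/'false' element, then scan only the remaining suffix for the opposite literal (alternative).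
-- ===== PORT A =====
def convert_strs_to_bool (values : List String) : Option Bool :=
  if values = [] then none
  else
    let flags := values.foldl (fun (acc : Bool × Bool) value =>
      let acc := if PySem.Str.lower value == "true" then (true, acc.2) else acc
      if PySem.Str.lower value == "false" then (acc.1, true) else acc) (false, false)
    let found_true := flags.1
    let found_false := flags.2
    if found_false && found_true then none
    else if found_true then some true
    else if found_false then some false
    else none

-- ===== PORT B =====
def convert_strs_to_bool_altGo : List String → Option Bool
  | [] => none
  | v :: rest =>
    let w := PySem.Str.lower v
    if w == "true" then
      if rest.any (fun u => PySem.Str.lower u == "false") then none else some true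
    else if w == "false" then
      if rest.any (fun u => PySem.Str.lower u == "true") then none else some false
    else convert_strs_to_bool_altGo rest

def convert_strs_to_bool_alt (values : List String) : Option Bool :=
  convert_strs_to_bool_altGo values

-- ===== PRECONDITION & SPEC =====
def Spec_convert_strs_to_bool (values : List String) (out : Option Bool) : Prop := out = convert_strs_to_bool_alt values
instance (values : List String) (out : Option Bool) : Decidable (Spec_convert_strs_to_bool values out) := by unfold Spec_convert_strs_to_bool; infer_instance

-- ===== CLAIM (what is proved, stated in full; the proofs are below) =====
def Claim_equal_convert_strs_to_bool : Prop := ∀ (values : List String), Dom_convert_strs_to_bool values → Spec_convert_strs_to_bool values (convert_strs_to_bool values)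

-- ===== LEMMAS AND PROOFS =====

-- A's fold accumulates exactly "some element lowers to the literal" in each flag.
theorem flags_eq (values : List String) (a b : Bool) :
    values.foldl (fun (acc : Bool × Bool) value =>
      let acc := if PySem.Str.lower value == "true" then (true, acc.2) else acc
      if PySem.Str.lower value == "false" then (acc.1, true) else acc) (a, b)
    = (a || values.any (fun v => PySem.Str.lower v == "true"),
       b || values.any (fun v => PySem.Str.lower v == "false")) := by
  induction values generalizing a b with
  | nil => simp
  | cons x xs ih =>
    rw [List.foldl_cons]
    have hstep : (fun (acc : Bool × Bool) value =>
        let acc := if PySem.Str.lower value == "true" then (true, acc.2) else acc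
        if PySem.Str.lower value == "false" then (acc.1, true) else acc) (a, b) x
        = (a || (PySem.Str.lower x == "true"), b || (PySem.Str.lower x == "false")) := by
      by_cases h1 : PySem.Str.lower x == "true" <;> by_cases h2 : PySem.Str.lower x == "false"
      · exact absurd (by rw [eq_of_beq h1] at h2; exact eq_of_beq h2) (by decide)
      all_goals simp [h1, h2]
    rw [show (let acc := if (PySem.Str.lower x == "true") = true then (true, (a, b).2) else (a, b);
        if (PySem.Str.lower x == "false") = true then (acc.1, true) else acc)
        = (a || (PySem.Str.lower x == "true"), b || (PySem.Str.lower x == "false")) from hstep, ih]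
    simp [Bool.or_assoc]

-- B's early-exit search computes the same function of the two "any" predicates as A's dispatch.
theorem altGo_eq (values : List String) :
    convert_strs_to_bool_altGo values
    = (if (values.any (fun v => PySem.Str.lower v == "false")) && (values.any (fun v => PySem.Str.lower v == "true")) then none
       else if values.any (fun v => PySem.Str.lower v == "true") then some true
       else if values.any (fun v => PySem.Str.lower v == "false") then some false
       else none) := by
  induction values with
  | nil => simp [convert_strs_to_bool_altGo]
  | cons x xs ih =>
    simp only [convert_strs_to_bool_altGo, List.any_cons]
    by_cases h1 : PySem.Str.lower x == "true" <;> by_cases h2 : PySem.Str.lower x == "false"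
    · exact absurd (by rw [eq_of_beq h1] at h2; exact eq_of_beq h2) (by decide)
    · simp only [h1, if_true]
      by_cases hf : (xs.any (fun u => PySem.Str.lower u == "false")) = true <;> simp [h2, hf]
    · simp only [h1, if_false, h2, if_true]
      by_cases ht : (xs.any (fun u => PySem.Str.lower u == "true")) = true <;> simp [h1, ht]
    · simp only [h1, h2, if_false, ih]
      simp

-- ===== VERDICT (by name: the statement is the Claim_ definition above) =====
theorem convert_strs_to_bool_spec : Claim_equal_convert_strs_to_bool := by
  intro values _
  unfold Spec_convert_strs_to_bool convert_strs_to_bool convert_strs_to_bool_alt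
  rw [altGo_eq]
  by_cases hnil : values = []
  · simp [hnil]
  · simp only [hnil, if_false, flags_eq, Bool.false_or]
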